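-- pv_equiv track=rewrite | github.com/zacharydrife/Python | pilotalg.py | funcDrop
-- ===== SOURCE A (Python) =====
-- def funcDrop(xCoordinate, yCoordinate):
--     # Combine the coordinates
--     coordinates = [(xCoordinate[i], yCoordinate[i]) for i in range(len(xCoordinate))]
--
--     # Sort by x values
--     coordinates.sort()
--
--     max_count = 0
--
--     # Count consecutive coordinates with the same x value
--     i = 0
--     while i < len(coordinates):
--         count = 1
--         while i + 1 < len(coordinates) and coordinates[i][0] == coordinates[i + 1][0]:
--             count += 1
--             i += 1
--         max_count = max(max_count, count)
--         i += 1
--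
--     # Sort by y values
--     coordinates.sort(key=lambda coord: coord[1])
--
--     # Count consecutive coordinates with the same y value
--     i = 0
--     while i < len(coordinates):
--         count = 1
--         while i + 1 < len(coordinates) and coordinates[i][1] == coordinates[i + 1][1]:
--             count += 1
--             i += 1
--         max_count = max(max_count, count)
--         i += 1
--
--     return max_count
-- ===== SOURCE B (Python) =====
-- def funcDrop(xCoordinate, yCoordinate):
--     # Combine the coordinates (same pairing; raises IndexError like A on mismatched lengths)
--     coordinates = [(xCoordinate[i], yCoordinate[i]) for i in range(len(xCoordinate))]
--
--     # One pass: tally how many points share each x and each y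
--     x_counts = {}
--     y_counts = {}
--     for x1, y1 in coordinates:
--         x_counts[x1] = x_counts.get(x1, 0) + 1
--         y_counts[y1] = y_counts.get(y1, 0) + 1
--
--     return max(max(x_counts.values(), default=0), max(y_counts.values(), default=0))
-- ===== Notes on version B (the rewrite author's own statement) =====
-- stated objective: faster
-- what changed: Replaces the two in-place sorts followed by index-based consecutive-run scans with a single pass that tallies per-x and per-y frequencies in two dicts and returns the largest tally.
import Mathlib
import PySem

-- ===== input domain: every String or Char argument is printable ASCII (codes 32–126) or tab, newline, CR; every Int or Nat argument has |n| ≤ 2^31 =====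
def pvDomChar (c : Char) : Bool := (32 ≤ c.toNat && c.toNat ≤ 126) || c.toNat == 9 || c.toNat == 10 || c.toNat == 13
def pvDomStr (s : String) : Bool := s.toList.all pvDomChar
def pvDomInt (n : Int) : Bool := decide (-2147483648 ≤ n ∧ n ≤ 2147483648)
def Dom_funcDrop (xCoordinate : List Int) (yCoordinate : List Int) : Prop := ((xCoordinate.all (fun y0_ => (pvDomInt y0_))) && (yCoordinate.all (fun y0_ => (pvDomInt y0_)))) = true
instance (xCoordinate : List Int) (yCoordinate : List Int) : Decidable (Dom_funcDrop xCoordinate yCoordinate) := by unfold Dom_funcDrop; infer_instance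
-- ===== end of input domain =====

-- B replaces A's two sorts + consecutive-run scans by one dict-tallying pass over the pairs (A mutates only its local list, so the return value is the whole behaviour).

-- ===== PORT A =====
-- the list comprehension [(xCoordinate[i], yCoordinate[i]) for i in range(len(xCoordinate))]
-- (identical first line of both Pythons; under Pre_ every index is in range, so pyGetD's default is never used)
def pvPairs (xCoordinate : List Int) (yCoordinate : List Int) : List (Int × Int) :=
  (PySem.List.pyRange 0 (PySem.List.len xCoordinate) 1).map
    (fun i => (PySem.List.pyGetD xCoordinate i 0, PySem.List.pyGetD yCoordinate i 0))

-- inner 'while i + 1 < len(coordinates) and f(coordinates[i]) == f(coordinates[i+1])' loop: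
-- state = (current count, list from position i+1 on); prev is coordinates[i]
def pvRun (f : Int × Int → Int) (prev : Int × Int) : List (Int × Int) → Int → Int × List (Int × Int)
  | [], count => (count, [])
  | d :: rest, count => if f d = f prev then pvRun f d rest (count + 1) else (count, d :: rest)

theorem pvRun_len (f : Int × Int → Int) :
    ∀ (l : List (Int × Int)) (prev : Int × Int) (k : Int), (pvRun f prev l k).2.length ≤ l.length := by
  intro l
  induction l with
  | nil => intro prev k; simp [pvRun]
  | cons d rest ih =>
      intro prev k
      simp only [pvRun]
      split
      · exact Nat.le_succ_of_le (ih d (k + 1))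
      · simp

-- outer 'while i < len(coordinates)' loop, carrying max_count
def pvRunScan (f : Int × Int → Int) (l : List (Int × Int)) (maxc : Int) : Int :=
  match l with
  | [] => maxc
  | c :: rest =>
      let s := pvRun f c rest 1
      pvRunScan f s.2 (max maxc s.1)
termination_by l.length
decreasing_by exact Nat.lt_succ_of_le (pvRun_len f rest c 1)

def funcDrop (xCoordinate : List Int) (yCoordinate : List Int) : Int :=
  let coordinates := pvPairs xCoordinate yCoordinate
  -- coordinates.sort()  (lexicographic on the pairs)
  let sortedX := PySem.List.sorted2 coordinates Prod.fst Prod.snd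
  let m1 := pvRunScan (fun c => c.1) sortedX 0
  -- coordinates.sort(key=lambda coord: coord[1])  (applied to the already x-sorted list)
  let sortedY := PySem.List.sorted sortedX (fun c => c.2)
  pvRunScan (fun c => c.2) sortedY m1

-- ===== PORT B =====
def funcDrop_alt (xCoordinate : List Int) (yCoordinate : List Int) : Int :=
  let coordinates := pvPairs xCoordinate yCoordinate
  -- the single tallying loop over both dicts (x_counts, y_counts)
  let counts := coordinates.foldl
    (fun (st : PySem.Dict Int Int × PySem.Dict Int Int) c =>
      (st.1.insert c.1 (st.1.getD c.1 0 + 1), st.2.insert c.2 (st.2.getD c.2 0 + 1)))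
    (PySem.Dict.empty, PySem.Dict.empty)
  -- max(max(x_counts.values(), default=0), max(y_counts.values(), default=0))
  max (PySem.List.maxD counts.1.values (fun v => v) 0)
    (PySem.List.maxD counts.2.values (fun v => v) 0)

-- ===== PRECONDITION & SPEC =====
-- Pre_ excludes exactly the inputs where A raises IndexError (yCoordinate shorter than xCoordinate); B raises there too.
def Pre_funcDrop (xCoordinate : List Int) (yCoordinate : List Int) : Prop :=
  xCoordinate.length ≤ yCoordinate.length
instance (xCoordinate : List Int) (yCoordinate : List Int) : Decidable (Pre_funcDrop xCoordinate yCoordinate) := by unfold Pre_funcDrop; infer_instance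

def pvWitness_funcDrop : List Int × List Int := ([1, 1, 2], [5, 6, 5])

def Spec_funcDrop (xCoordinate : List Int) (yCoordinate : List Int) (out : Int) : Prop := out = funcDrop_alt xCoordinate yCoordinate
instance (xCoordinate : List Int) (yCoordinate : List Int) (out : Int) : Decidable (Spec_funcDrop xCoordinate yCoordinate out) := by unfold Spec_funcDrop; infer_instance

-- ===== CLAIM (what is proved, stated in full; the proofs are below) =====
def Claim_equal_funcDrop : Prop := ∀ (xCoordinate : List Int) (yCoordinate : List Int), Dom_funcDrop xCoordinate yCoordinate → Pre_funcDrop xCoordinate yCoordinate → Spec_funcDrop xCoordinate yCoordinate (funcDrop xCoordinate yCoordinate)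

-- ===== LEMMAS AND PROOFS =====

-- pvRun computes run length + remainder via takeWhile/dropWhile (equality chaining: no sortedness needed)
theorem pvRun_eq (f : Int × Int → Int) :
    ∀ (l : List (Int × Int)) (prev : Int × Int) (k : Int),
      pvRun f prev l k =
        (k + ((l.takeWhile (fun d => f d == f prev)).length : Nat),
         l.dropWhile (fun d => f d == f prev)) := by
  intro l
  induction l with
  | nil => intro prev k; simp [pvRun]
  | cons d rest ih =>
      intro prev k
      by_cases h : f d = f prev
      · have hb : (f d == f prev) = true := by simp [h]
        simp only [pvRun, if_pos h]
        rw [ih d (k + 1)]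
        have hpred : (fun e => f e == f d) = (fun e => f e == f prev) := by
          funext e; rw [h]
        rw [hpred]
        simp only [List.takeWhile_cons, List.dropWhile_cons, hb, if_true]
        refine Prod.ext ?_ rfl
        simp only [List.length_cons]
        push_cast
        ring
      · have hb : (f d == f prev) = false := by simp [h]
        simp [pvRun, if_neg h, hb]

-- elements surviving dropWhile (f · == v) in a key-sorted list have key strictly above v
theorem lt_of_mem_dropWhile (f : Int × Int → Int) (v : Int) :
    ∀ (rest : List (Int × Int)), rest.Pairwise (fun a b => f a ≤ f b) →
      (∀ a ∈ rest, v ≤ f a) →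
      ∀ e ∈ rest.dropWhile (fun d => f d == v), v < f e := by
  intro rest
  induction rest with
  | nil => simp
  | cons d rs ih =>
      intro hp hle e he
      rw [List.dropWhile_cons] at he
      by_cases h : f d = v
      · rw [if_pos (by simp [h])] at he
        exact ih hp.of_cons (fun a ha => hle a (List.mem_cons_of_mem d ha)) e he
      · rw [if_neg (by simp [h])] at he
        have hdv : v < f d := lt_of_le_of_ne (hle d (List.mem_cons_self)) (fun hh => h hh.symm)
        rcases List.mem_cons.mp he with rfl | hrs
        · exact hdv
        · exact lt_of_lt_of_le hdv ((List.pairwise_cons.mp hp).1 e hrs)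

-- folding 'max · K' over a list starting at max m K stays max m K
theorem foldl_max_const (K : Int) :
    ∀ (t : List (Int × Int)) (m : Int), t.foldl (fun a _ => max a K) (max m K) = max m K := by
  intro t
  induction t with
  | nil => intro m; rfl
  | cons c t ih => intro m; simp only [List.foldl_cons, max_assoc, max_self]; exact ih m

-- hoisting a max out of a running-max fold
theorem foldl_max_hoist {α : Type} (g : α → Int) :
    ∀ (l : List α) (M k : Int),
      l.foldl (fun a c => max a (g c)) (max M k) = max (l.foldl (fun a c => max a (g c)) M) k := by
  intro l
  induction l with
  | nil => intro M k; rfl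
  | cons c t ih =>
      intro M k
      simp only [List.foldl_cons, max_right_comm M k (g c)]
      exact ih (max M (g c)) k

-- running-max folds of a projection are permutation-invariant
theorem foldl_max_perm {α : Type} (g : α → Int) {l₁ l₂ : List α} (h : l₁.Perm l₂) (m : Int) :
    l₁.foldl (fun a c => max a (g c)) m = l₂.foldl (fun a c => max a (g c)) m :=
  List.Perm.foldl_eq (rcomm := ⟨fun a b c => max_right_comm a (g b) (g c)⟩) h m

-- an upper bound for a running-max fold of a projection
theorem foldl_max_le {α : Type} (g : α → Int) :
    ∀ (l : List α) (a b : Int), a ≤ b → (∀ x ∈ l, g x ≤ b) →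
      l.foldl (fun acc x => max acc (g x)) a ≤ b := by
  intro l
  induction l with
  | nil => intro a b h _; exact h
  | cons c t ih =>
      intro a b h hx
      simp only [List.foldl_cons]
      exact ih (max a (g c)) b (max_le h (hx c List.mem_cons_self))
        (fun x hxm => hx x (List.mem_cons_of_mem c hxm))

-- Python's count of a projected value
theorem count_map_key (f : Int × Int → Int) (cs : List (Int × Int)) (v : Int) :
    (cs.map f).count v = cs.countP (fun d => f d == v) := by
  simp [List.count, List.countP_map, Function.comp_def]

-- max(counter(zs).values(), default=0) is the running max of each element's multiplicity
theorem sup_counts (zs : List Int) :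
    PySem.List.maxD (PySem.Dict.counter zs).values (fun v => v) 0
      = zs.foldl (fun a v => max a ((zs.count v : Nat) : Int)) 0 := by
  have hvals : (PySem.Dict.counter zs).values
      = (PySem.Set.ofList zs).map (fun k => ((zs.count k : Nat) : Int)) := by
    simp [PySem.Dict.values, PySem.Dict.items_counter, List.map_map, Function.comp]
  rw [hvals]
  cases zs with
  | nil => rfl
  | cons z zt =>
      have hzmem : z ∈ PySem.Set.ofList (z :: zt) :=
        (PySem.Set.mem_ofList (z :: zt) z).mpr List.mem_cons_self
      cases h : PySem.Set.ofList (z :: zt) with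
      | nil => rw [h] at hzmem; exact absurd hzmem (List.not_mem_nil)
      | cons k0 t0 =>
          set zs := z :: zt with hzs
          set c : Int → Int := fun k => ((zs.count k : Nat) : Int) with hc
          have hmemz : ∀ k, k ∈ k0 :: t0 → k ∈ zs := fun k hk =>
            (PySem.Set.mem_ofList zs k).mp (h ▸ hk)
          rw [List.map_cons]
          have hmaxD : PySem.List.maxD (c k0 :: t0.map c) (fun v => v) 0
              = (t0.map c).foldl max (c k0) := by
            rw [PySem.List.maxD, PySem.List.max?_id_cons]
            rfl
          rw [hmaxD]
          set S := zs.foldl (fun a v => max a (c v)) 0 with hS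
          have hboundS := PySem.List.le_foldl_max_int zs c 0
          have hboundM := PySem.List.le_foldl_max (t0.map c) (c k0)
          apply le_antisymm
          · -- every tallied value is the multiplicity of a member of zs
            refine foldl_max_le (fun v => v) (t0.map c) (c k0) S
              (hboundS.2 k0 (hmemz k0 List.mem_cons_self)) ?_
            intro x hx
            rcases List.mem_map.mp hx with ⟨k, hk, rfl⟩
            exact hboundS.2 k (hmemz k (List.mem_cons_of_mem k0 hk))
          · -- every element's multiplicity appears among the tallied values
            refine foldl_max_le c zs 0 ((t0.map c).foldl max (c k0)) ?_ ?_
            · exact le_trans (Int.natCast_nonneg (zs.count k0)) hboundM.1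
            · intro v hv
              have hvset : v ∈ k0 :: t0 := h ▸ (PySem.Set.mem_ofList zs v).mpr hv
              rcases List.mem_cons.mp hvset with rfl | hvt
              · exact hboundM.1
              · exact hboundM.2 (c v) (List.mem_map.mpr ⟨v, hvt, rfl⟩)

-- MAIN SCAN LEMMA: on a key-sorted list, A's consecutive-run scan is the running max of
-- 'number of elements of l sharing this element's key'
theorem pvRunScan_sorted (f : Int × Int → Int) :
    ∀ (n : Nat) (l : List (Int × Int)), l.length ≤ n → l.Pairwise (fun a b => f a ≤ f b) →
      ∀ m, pvRunScan f l m =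
        l.foldl (fun a c => max a ((l.countP (fun d => f d == f c) : Nat) : Int)) m := by
  intro n
  induction n with
  | zero =>
      intro l hl _ m
      rw [List.length_eq_zero_iff.mp (Nat.le_zero.mp hl)]
      simp [pvRunScan]
  | succ n ih =>
      intro l hl hp m
      match l with
      | [] => simp [pvRunScan]
      | c :: rest =>
          have hstep : pvRunScan f (c :: rest) m =
              pvRunScan f (rest.dropWhile (fun d => f d == f c))
                (max m (1 + ((rest.takeWhile (fun d => f d == f c)).length : Nat))) := by
            rw [pvRunScan]
            rw [pvRun_eq f rest c 1]
          set p : Int × Int → Bool := fun d => f d == f c with hpdef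
          set tk := rest.takeWhile p with htk
          set dr := rest.dropWhile p with hdr
          have hsplit : rest = tk ++ dr := (List.takeWhile_append_dropWhile).symm
          have hrest_le : ∀ a ∈ rest, f c ≤ f a := fun a ha => (List.pairwise_cons.mp hp).1 a ha
          have hdr_lt : ∀ e ∈ dr, f c < f e :=
            lt_of_mem_dropWhile f (f c) rest (List.Pairwise.of_cons hp) hrest_le
          have htk_eq : ∀ e ∈ tk, f e = f c := fun e he => by
            have := List.mem_takeWhile_imp he
            exact eq_of_beq this
          -- the count of f c in the whole list
          have hcount : ((c :: rest).countP p : Nat) = 1 + tk.length := by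
            have h1 : tk.countP p = tk.length :=
              List.countP_eq_length.mpr (fun a ha => by simp [hpdef, htk_eq a ha])
            have h2 : dr.countP p = 0 :=
              List.countP_eq_zero.mpr (fun a ha => by
                simp only [hpdef, beq_iff_eq]
                exact fun hh => absurd hh (ne_of_gt (hdr_lt a ha)))
            rw [hsplit, List.countP_cons, List.countP_append, h1, h2,
              if_pos (show p c = true by simp [hpdef])]
            omega
          -- counts of dr-elements ignore the first run
          have hcnt_dr : ∀ e ∈ dr,
              (c :: rest).countP (fun d => f d == f e) = dr.countP (fun d => f d == f e) := by
            intro e he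
            have hne : f c < f e := hdr_lt e he
            have h0 : tk.countP (fun d => f d == f e) = 0 :=
              List.countP_eq_zero.mpr (fun a ha => by
                simp only [beq_iff_eq]
                rw [htk_eq a ha]; exact ne_of_lt hne)
            rw [hsplit, List.countP_cons, List.countP_append, h0,
              if_neg (show ¬((fun d => f d == f e) c = true) by
                simp only [beq_iff_eq]; exact ne_of_lt hne)]
            omega
          -- the fold over the first run is a constant max
          set K : Int := (((1 + tk.length : Nat)) : Int) with hK
          have hfold : (c :: rest).foldl
                (fun a c' => max a (((c :: rest).countP (fun d => f d == f c') : Nat) : Int)) m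
              = dr.foldl (fun a c' => max a ((dr.countP (fun d => f d == f c') : Nat) : Int)) (max m K) := by
            have hsplit2 : c :: rest = (c :: tk) ++ dr := by rw [hsplit, List.cons_append]
            rw [hsplit2, List.foldl_append]
            rw [hsplit2] at hcount hcnt_dr
            have hfirst : (c :: tk).foldl
                  (fun a c' => max a ((((c :: tk) ++ dr).countP (fun d => f d == f c') : Nat) : Int)) m
                = max m K := by
              rw [PySem.List.foldl_congr_mem (c :: tk) _ (fun a _ => max a K) m ?_]
              · simp only [List.foldl_cons]
                exact foldl_max_const K tk m
              · intro acc e he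
                have hfe : f e = f c := by
                  rcases List.mem_cons.mp he with rfl | he'
                  · rfl
                  · exact htk_eq e he'
                have : ((c :: tk) ++ dr).countP (fun d => f d == f e)
                    = ((c :: tk) ++ dr).countP p := by rw [hfe, hpdef]
                rw [this, hcount, hK]
            rw [hfirst]
            exact PySem.List.foldl_congr_mem dr _ _ (max m K) (fun acc e he => by
              rw [hcnt_dr e he])
          rw [hstep, hfold]
          have hdrlen : dr.length ≤ n := by
            have h1 : dr.length ≤ rest.length := List.length_dropWhile_le p rest
            have h2 : rest.length ≤ n := by simpa using Nat.le_of_succ_le_succ hl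
            omega
          have hdrpw : dr.Pairwise (fun a b => f a ≤ f b) :=
            List.Pairwise.sublist (List.dropWhile_sublist p) (List.Pairwise.of_cons hp)
          rw [ih dr hdrlen hdrpw (max m (1 + ((tk.length : Nat) : Int)))]
          congr 1

-- sorted2 xs fst snd is pairwise ≤ on first components, via the insertBy invariant
theorem insertBy_pairwise {α : Type} (before : α → α → Bool)
    (hA : ∀ a b, before a b = true → before b a = false)
    (hT : ∀ a b c, before b a = false → before c b = false → before c a = false)
    (x : α) : ∀ (acc : List α), acc.Pairwise (fun a b => before b a = false) →
      (PySem.List.insertBy before x acc).Pairwise (fun a b => before b a = false) := by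
  intro acc
  induction acc with
  | nil => intro _; simp [PySem.List.insertBy]
  | cons e rest ih =>
      intro hp
      rw [PySem.List.insertBy]
      by_cases hb : before x e = true
      · rw [if_pos hb]
        refine List.pairwise_cons.mpr ⟨?_, hp⟩
        intro y hy
        rcases List.mem_cons.mp hy with rfl | hy'
        · exact hA x y hb
        · exact hT x e y (hA x e hb) ((List.pairwise_cons.mp hp).1 y hy')
      · rw [if_neg hb]
        refine List.pairwise_cons.mpr ⟨?_, ih (List.Pairwise.of_cons hp)⟩
        intro y hy
        rcases (PySem.List.mem_insertBy before x y rest).mp hy with rfl | hy'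
        · exact Bool.eq_false_iff.mpr hb
        · exact (List.pairwise_cons.mp hp).1 y hy'

theorem foldl_insertBy_pairwise {α : Type} (before : α → α → Bool)
    (hA : ∀ a b, before a b = true → before b a = false)
    (hT : ∀ a b c, before b a = false → before c b = false → before c a = false) :
    ∀ (xs acc : List α), acc.Pairwise (fun a b => before b a = false) →
      (xs.foldl (fun acc x => PySem.List.insertBy before x acc) acc).Pairwise
        (fun a b => before b a = false) := by
  intro xs
  induction xs with
  | nil => intro acc h; exact h
  | cons x xs ih =>
      intro acc h
      exact ih _ (insertBy_pairwise before hA hT x acc h)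

theorem sorted2_pairwise_fst (xs : List (Int × Int)) :
    (PySem.List.sorted2 xs Prod.fst Prod.snd).Pairwise (fun a b => a.1 ≤ b.1) := by
  have h := foldl_insertBy_pairwise
      (before := fun a b : Int × Int =>
        decide (a.1 < b.1) || (!decide (b.1 < a.1) && decide (a.2 < b.2)))
      (by intro a b h
          simp at h ⊢
          omega)
      (by intro a b c h1 h2
          simp at h1 h2 ⊢
          omega)
      xs [] List.Pairwise.nil
  rw [show PySem.List.sorted2 xs Prod.fst Prod.snd =
      xs.foldl (fun acc x => PySem.List.insertBy
        (fun a b : Int × Int => decide (a.1 < b.1) || (!decide (b.1 < a.1) && decide (a.2 < b.2)))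
        x acc) [] from rfl]
  refine List.Pairwise.imp ?_ h
  intro a b hab
  simp only [Bool.or_eq_false_iff, decide_eq_false_iff_not] at hab
  omega

-- ===== VERDICT (by name: the statement is the Claim_ definition above) =====
set_option maxHeartbeats 1000000 in
theorem funcDrop_spec : Claim_equal_funcDrop := by
  intro x y _ _
  show funcDrop x y = funcDrop_alt x y
  rw [show funcDrop x y = pvRunScan (fun c => c.2)
      (PySem.List.sorted (PySem.List.sorted2 (pvPairs x y) Prod.fst Prod.snd) (fun c => c.2))
      (pvRunScan (fun c => c.1) (PySem.List.sorted2 (pvPairs x y) Prod.fst Prod.snd) 0) from rfl,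
    show funcDrop_alt x y =
      max (PySem.List.maxD ((pvPairs x y).foldl
          (fun (st : PySem.Dict Int Int × PySem.Dict Int Int) c =>
            (st.1.insert c.1 (st.1.getD c.1 0 + 1), st.2.insert c.2 (st.2.getD c.2 0 + 1)))
          (PySem.Dict.empty, PySem.Dict.empty)).1.values (fun v => v) 0)
        (PySem.List.maxD ((pvPairs x y).foldl
          (fun (st : PySem.Dict Int Int × PySem.Dict Int Int) c =>
            (st.1.insert c.1 (st.1.getD c.1 0 + 1), st.2.insert c.2 (st.2.getD c.2 0 + 1)))
          (PySem.Dict.empty, PySem.Dict.empty)).2.values (fun v => v) 0) from rfl]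
  set cs := pvPairs x y with hcs
  set s1 := PySem.List.sorted2 cs Prod.fst Prod.snd with hs1
  set s2 := PySem.List.sorted s1 (fun c => c.2) with hs2
  have hperm1 : s1.Perm cs := PySem.List.sorted2_perm cs Prod.fst Prod.snd false
  have hperm2 : s2.Perm cs := (PySem.List.sorted_perm s1 (fun c => c.2) false).trans hperm1
  -- A's first scan is the running max of the shared-x tallies over cs
  have e1 : pvRunScan (fun c => c.1) s1 0 =
      cs.foldl (fun a c => max a ((cs.countP (fun d => d.1 == c.1) : Nat) : Int)) 0 := by
    rw [pvRunScan_sorted (fun c => c.1) s1.length s1 le_rfl (sorted2_pairwise_fst cs) 0]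
    have hstep := foldl_max_perm (fun c : Int × Int => ((cs.countP (fun d => d.1 == c.1) : Nat) : Int)) hperm1 0
    simp only [hperm1.countP_eq]
    exact hstep
  -- A's second scan, from any starting maximum
  have e2 : ∀ m, pvRunScan (fun c => c.2) s2 m =
      cs.foldl (fun a c => max a ((cs.countP (fun d => d.2 == c.2) : Nat) : Int)) m := by
    intro m
    rw [pvRunScan_sorted (fun c => c.2) s2.length s2 le_rfl
      (PySem.List.sorted_pairwise s1 (fun c => c.2)) m]
    have hstep := foldl_max_perm (fun c : Int × Int => ((cs.countP (fun d => d.2 == c.2) : Nat) : Int)) hperm2 m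
    simp only [hperm2.countP_eq]
    exact hstep
  rw [e1, e2]
  -- B's loop is the two counters of the projections
  rw [PySem.List.foldl_prod_mk
    (f := fun (d : PySem.Dict Int Int) (c : Int × Int) => d.insert c.1 (d.getD c.1 0 + 1))
    (g := fun (d : PySem.Dict Int Int) (c : Int × Int) => d.insert c.2 (d.getD c.2 0 + 1))]
  have hdx : cs.foldl (fun (d : PySem.Dict Int Int) (c : Int × Int) => d.insert c.1 (d.getD c.1 0 + 1))
      PySem.Dict.empty = PySem.Dict.counter (cs.map (fun c => c.1)) := by
    rw [← PySem.Dict.foldl_insert_getD_add_one_eq_counter (cs.map (fun c => c.1)), List.foldl_map]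
  have hdy : cs.foldl (fun (d : PySem.Dict Int Int) (c : Int × Int) => d.insert c.2 (d.getD c.2 0 + 1))
      PySem.Dict.empty = PySem.Dict.counter (cs.map (fun c => c.2)) := by
    rw [← PySem.Dict.foldl_insert_getD_add_one_eq_counter (cs.map (fun c => c.2)), List.foldl_map]
  rw [hdx, hdy, sup_counts, sup_counts]
  -- the tally maxima as running-max folds over cs itself
  simp only [List.foldl_map, count_map_key]
  -- finally: folding the y-tallies from A's x-maximum = max of the two maxima
  set SX := cs.foldl (fun a (c : Int × Int) => max a ((cs.countP (fun d => d.1 == c.1) : Nat) : Int)) 0 with hSX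
  have h0 : (0 : Int) ≤ SX :=
    (PySem.List.le_foldl_max_int cs (fun c => ((cs.countP (fun d => d.1 == c.1) : Nat) : Int)) 0).1
  calc cs.foldl (fun a c => max a ((cs.countP (fun d => d.2 == c.2) : Nat) : Int)) SX
      = cs.foldl (fun a c => max a ((cs.countP (fun d => d.2 == c.2) : Nat) : Int)) (max 0 SX) := by
        rw [max_eq_right h0]
    _ = max (cs.foldl (fun a c => max a ((cs.countP (fun d => d.2 == c.2) : Nat) : Int)) 0) SX :=
        foldl_max_hoist _ cs 0 SX
    _ = max SX (cs.foldl (fun a c => max a ((cs.countP (fun d => d.2 == c.2) : Nat) : Int)) 0) :=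
        max_comm _ _
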